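-- pv_equiv track=rewrite | github.com/arnaudlequen/PDDLIsomorphismFinder | Benchmarks/instance_trimmer.py | process_obj_string
-- ===== SOURCE A (Python) =====
-- def process_obj_string(objects_tmp):
--     """
--     Convert the raw list of elements found in list :objects to a dictionary of
--     typed symbols lists
--     """
--     objects = {}
--
--     last_cut = 0  # Index of the last item to be assigned in objects
--     skip = False
--     for i, obj in enumerate(objects_tmp):
--         if skip:
--             skip = False
--             continue
--
--         if obj == '-':
--             if objects_tmp[i+1] in objects:
--                 objects[objects_tmp[i+1]].extend(objects_tmp[last_cut:i])
--             else:
--                 objects[objects_tmp[i+1]] = objects_tmp[last_cut:i]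
--             last_cut = i+2
--
--     if not objects:
--         return {'UNTYPED': objects_tmp}
--
--     return objects
-- ===== SOURCE B (Python) =====
-- def process_obj_string(objects_tmp):
--     """
--     Convert the raw list of elements found in list :objects to a dictionary of
--     typed symbols lists
--     """
--     dashes = [i for i, tok in enumerate(objects_tmp) if tok == '-']
--     if not dashes:
--         return {'UNTYPED': objects_tmp}
--     bounds = [0] + [d + 2 for d in dashes[:-1]]
--     pairs = [(objects_tmp[d + 1], objects_tmp[b:d]) for b, d in zip(bounds, dashes)]
--     seen = list(dict.fromkeys(t for t, _ in pairs))
--     return {t: [x for u, seg in pairs if u == t for x in seg] for t in seen}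
-- ===== Notes on version B (the rewrite author's own statement) =====
-- stated objective: alternative
-- what changed: B replaces A's single stateful scan (dict mutated in place with a last_cut register and a dead skip flag) by staged passes over precomputed data: collect the dash positions, compute each segment's left boundary arithmetically, build an explicit list of (type, segment) pairs, and finally group them with an ordered dedup of the keys and a flattening comprehension per key.
import Mathlib
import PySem

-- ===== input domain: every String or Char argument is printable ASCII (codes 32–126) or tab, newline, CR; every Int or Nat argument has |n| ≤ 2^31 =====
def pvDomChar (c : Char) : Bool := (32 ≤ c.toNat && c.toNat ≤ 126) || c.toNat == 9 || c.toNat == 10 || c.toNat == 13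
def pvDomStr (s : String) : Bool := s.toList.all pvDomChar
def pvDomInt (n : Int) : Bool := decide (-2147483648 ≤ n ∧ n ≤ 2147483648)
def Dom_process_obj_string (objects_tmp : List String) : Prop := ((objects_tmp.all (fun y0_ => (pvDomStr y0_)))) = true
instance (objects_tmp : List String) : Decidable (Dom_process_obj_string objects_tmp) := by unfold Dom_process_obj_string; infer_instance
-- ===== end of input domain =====

-- B replaces A's stateful scan (in-place dict, last_cut register, dead skip flag) by staged passes:
-- dash positions, arithmetic segment boundaries, an explicit (type, segment) pair list, then a
-- group-by with ordered key dedup (objective: alternative decomposition; same value everywhere).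
-- Return-value equivalence only: neither version mutates its argument.

-- ===== PORT A =====
-- one loop iteration of A: state = (objects dict, last_cut, skip)
def pvAStep (objects_tmp : List String)
    (st : PySem.Dict String (List String) × Int × Bool) (p : Int × String) :
    PySem.Dict String (List String) × Int × Bool :=
  if st.2.2 then (st.1, st.2.1, false)                     -- "if skip: skip = False; continue" (dead: A never sets skip)
  else if p.2 == "-" then
    match PySem.List.pyGet? objects_tmp (p.1 + 1) with
    | none => st                                           -- Python raises IndexError here; excluded by Pre_
    | some t =>
      let seg := PySem.List.slice objects_tmp (some st.2.1) (some p.1)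
      ((if st.1.contains t then st.1.modify t [] (· ++ seg) else st.1.insert t seg), p.1 + 2, st.2.2)
  else st

def process_obj_string (objects_tmp : List String) : List (String × List String) :=
  let r := (PySem.List.enumerate objects_tmp).foldl (pvAStep objects_tmp)
             ((PySem.Dict.empty : PySem.Dict String (List String)), (0 : Int), false)
  if r.1.items.isEmpty then [("UNTYPED", objects_tmp)] else r.1.items

-- ===== PORT B =====
-- the pair-building comprehension: (objects_tmp[d+1], objects_tmp[b:d]) for (b, d) in zip(bounds, dashes)
def pvPairs (objects_tmp : List String) (bd : List (Int × Int)) : List (String × List String) :=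
  bd.foldr (fun bd acc =>
    match PySem.List.pyGet? objects_tmp (bd.2 + 1) with
    | none => acc                                          -- Python raises IndexError here; excluded by Pre_
    | some t => (t, PySem.List.slice objects_tmp (some bd.1) (some bd.2)) :: acc) []

def process_obj_string_alt (objects_tmp : List String) : List (String × List String) :=
  let dashes := ((PySem.List.enumerate objects_tmp).filter (fun p => p.2 == "-")).map (·.1)
  if dashes.isEmpty then [("UNTYPED", objects_tmp)]
  else
    let bounds := (0 : Int) :: (dashes.dropLast.map (· + 2))
    let pairs := pvPairs objects_tmp (bounds.zip dashes)
    let seen := PySem.List.dedup (pairs.map (·.1))         -- list(dict.fromkeys(...))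
    seen.map (fun t => (t, ((pairs.filter (fun p => p.1 == t)).map (·.2)).flatten))

-- ===== PRECONDITION & SPEC =====
-- Pre_ excludes exactly the lists whose last element is '-': there A (and B) raise IndexError reading the type token after the dash.
def Pre_process_obj_string (objects_tmp : List String) : Prop :=
  objects_tmp.getLast? ≠ some "-"
instance (objects_tmp : List String) : Decidable (Pre_process_obj_string objects_tmp) := by
  unfold Pre_process_obj_string; infer_instance
def pvWitness_process_obj_string : List String := ["a", "b", "-", "t", "c", "-", "t"]
def Spec_process_obj_string (objects_tmp : List String) (out : List (String × List String)) : Prop := out = process_obj_string_alt objects_tmp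
instance (objects_tmp : List String) (out : List (String × List String)) : Decidable (Spec_process_obj_string objects_tmp out) := by unfold Spec_process_obj_string; infer_instance

-- ===== CLAIM (what is proved, stated in full; the proofs are below) =====
def Claim_equal_process_obj_string : Prop := ∀ (objects_tmp : List String), Dom_process_obj_string objects_tmp → Pre_process_obj_string objects_tmp → Spec_process_obj_string objects_tmp (process_obj_string objects_tmp)

-- ===== LEMMAS AND PROOFS =====

-- proof-only view of A's dash handling: the dict update done at one dash, on a (type, segment) pair
def pvG (dd : PySem.Dict String (List String)) (p : String × List String) :
    PySem.Dict String (List String) :=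
  if dd.contains p.1 then dd.modify p.1 [] (· ++ p.2) else dd.insert p.1 p.2

-- proof-only view of A's loop restricted to the dash positions, threading last_cut
def pvDStep (objects_tmp : List String)
    (st : PySem.Dict String (List String) × Int) (d : Int) :
    PySem.Dict String (List String) × Int :=
  match PySem.List.pyGet? objects_tmp (d + 1) with
  | none => st
  | some t => (pvG st.1 (t, PySem.List.slice objects_tmp (some st.2) (some d)), d + 2)

-- A's fold over the enumeration (skip is invariantly false) is the fold of pvDStep over the dash positions.
lemma pvFold_eq (objects_tmp : List String) :
    ∀ (l : List (Int × String)) (dm : PySem.Dict String (List String)) (lc : Int),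
      l.foldl (pvAStep objects_tmp) (dm, lc, false)
        = ((((l.filter (fun p => p.2 == "-")).map (·.1)).foldl (pvDStep objects_tmp) (dm, lc)).1,
           (((l.filter (fun p => p.2 == "-")).map (·.1)).foldl (pvDStep objects_tmp) (dm, lc)).2, false) := by
  intro l
  induction l with
  | nil => intro dm lc; simp
  | cons p rest ih =>
    intro dm lc
    rw [List.foldl_cons, List.filter_cons]
    by_cases hx : p.2 == "-"
    · have hA : pvAStep objects_tmp (dm, lc, false) p
          = ((pvDStep objects_tmp (dm, lc) p.1).1, (pvDStep objects_tmp (dm, lc) p.1).2, false) := by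
        simp only [pvAStep, pvDStep, pvG, hx, if_true]
        cases hg : PySem.List.pyGet? objects_tmp (p.1 + 1) <;> simp
      rw [hA]
      simp only [hx, if_true, List.map_cons, List.foldl_cons]
      exact ih _ _
    · have hA : pvAStep objects_tmp (dm, lc, false) p = (dm, lc, false) := by
        simp [pvAStep, hx]
      rw [hA]
      simp only [hx, Bool.false_eq_true, if_false]
      exact ih dm lc

-- when every dash position has its type token in range, A's fold over the dashes performs
-- exactly pvG over B's (type, segment) pair list built from the zipped boundaries
lemma pvFold_pairs (objects_tmp : List String) :
    ∀ (ds : List Int) (dm : PySem.Dict String (List String)) (lc : Int),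
      (∀ d ∈ ds, (PySem.List.pyGet? objects_tmp (d + 1)).isSome) →
      (ds.foldl (pvDStep objects_tmp) (dm, lc)).1
        = (pvPairs objects_tmp ((lc :: ds.dropLast.map (· + 2)).zip ds)).foldl pvG dm := by
  intro ds
  induction ds with
  | nil => intro dm lc _; simp [pvPairs]
  | cons d rest ih =>
    intro dm lc h
    obtain ⟨t, ht⟩ := Option.isSome_iff_exists.mp (h d List.mem_cons_self)
    have hzip : (lc :: (d :: rest).dropLast.map (· + 2)).zip (d :: rest)
        = (lc, d) :: (((d + 2) :: rest.dropLast.map (· + 2)).zip rest) := by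
      cases rest with
      | nil => simp
      | cons e es => simp [List.dropLast]
    rw [hzip, List.foldl_cons]
    have hstep : pvDStep objects_tmp (dm, lc) d
        = (pvG dm (t, PySem.List.slice objects_tmp (some lc) (some d)), d + 2) := by
      simp [pvDStep, ht]
    rw [hstep]
    have hpairs : pvPairs objects_tmp ((lc, d) :: (((d + 2) :: rest.dropLast.map (· + 2)).zip rest))
        = (t, PySem.List.slice objects_tmp (some lc) (some d))
            :: pvPairs objects_tmp (((d + 2) :: rest.dropLast.map (· + 2)).zip rest) := by
      simp [pvPairs, ht]
    rw [hpairs, List.foldl_cons]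
    exact ih _ _ (fun x hx => h x (List.mem_cons_of_mem _ hx))

-- keys of the pvG fold: first occurrences of the pair keys, appended to the starting keys
lemma pvKeys_fold (l : List (String × List String)) :
    ∀ (dm : PySem.Dict String (List String)),
      (l.foldl pvG dm).keys = PySem.Set.update dm.keys (l.map (·.1)) := by
  induction l with
  | nil => intro dm; simp [PySem.Set.update]
  | cons p rest ih =>
    intro dm
    rw [List.foldl_cons, List.map_cons, PySem.Set.update_cons, ih]
    congr 1
    by_cases hc : dm.contains p.1
    · rw [pvG, if_pos hc, PySem.Dict.keys_modify, PySem.Dict.keys_insert_of_contains _ _ hc,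
        PySem.Set.add_of_mem ((PySem.Dict.contains_iff_mem_keys _ _).mp hc)]
    · rw [pvG, if_neg hc, PySem.Dict.keys_insert_of_not_contains _ _ (Bool.eq_false_iff.mpr hc),
        PySem.Set.add_of_not_mem]
      intro hm
      exact hc ((PySem.Dict.contains_iff_mem_keys _ _).mpr hm)

-- keys stay Nodup through the pvG fold
lemma pvNodup_fold (l : List (String × List String)) :
    ∀ (dm : PySem.Dict String (List String)), dm.keys.Nodup → (l.foldl pvG dm).keys.Nodup := by
  induction l with
  | nil => intro dm h; exact h
  | cons p rest ih =>
    intro dm h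
    rw [List.foldl_cons]
    apply ih
    by_cases hc : dm.contains p.1
    · rw [pvG, if_pos hc, PySem.Dict.keys_modify, PySem.Dict.keys_insert_of_contains _ _ hc]; exact h
    · rw [pvG, if_neg hc, PySem.Dict.keys_insert_of_not_contains _ _ (Bool.eq_false_iff.mpr hc)]
      exact h.append (List.nodup_singleton _)
        (by
          intro a ha hb
          rw [List.mem_singleton] at hb
          subst hb
          exact hc ((PySem.Dict.contains_iff_mem_keys _ _).mpr ha))

-- value at key c after the pvG fold: the starting value followed by all segments filed under c
lemma pvGetD_fold (l : List (String × List String)) :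
    ∀ (dm : PySem.Dict String (List String)) (c : String),
      (l.foldl pvG dm).getD c []
        = dm.getD c [] ++ ((l.filter (fun p => p.1 == c)).map (·.2)).flatten := by
  induction l with
  | nil => intro dm c; simp
  | cons p rest ih =>
    intro dm c
    rw [List.foldl_cons, ih, List.filter_cons]
    have hstep : (pvG dm p).getD c [] = if c = p.1 then dm.getD c [] ++ p.2 else dm.getD c [] := by
      by_cases hc : dm.contains p.1
      · rw [pvG, if_pos hc, PySem.Dict.getD_modify]
        by_cases he : c = p.1
        · subst he; simp
        · simp [he]
      · rw [pvG, if_neg hc, PySem.Dict.getD_insert]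
        by_cases he : c = p.1
        · subst he; rw [if_pos rfl, PySem.Dict.getD_of_not_contains _ _ (Bool.eq_false_iff.mpr hc)]; simp
        · simp [he]
    rw [hstep]
    by_cases he : c = p.1
    · subst he; simp [List.append_assoc]
    · have : ¬ (p.1 == c) = true := by simpa using fun h => he h.symm
      simp only [this, Bool.false_eq_true, if_false, if_neg he]

-- under Pre_, every dash position has its type token in range
lemma pvDash_get_some (objects_tmp : List String) (hpre : objects_tmp.getLast? ≠ some "-")
    (d : Int)
    (hd : d ∈ ((PySem.List.enumerate objects_tmp).filter (fun p => p.2 == "-")).map (·.1)) :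
    ∃ t, PySem.List.pyGet? objects_tmp (d + 1) = some t := by
  obtain ⟨p, hp, rfl⟩ := List.mem_map.mp hd
  obtain ⟨hmem, hdash⟩ := List.mem_filter.mp hp
  obtain ⟨k, hk, rfl⟩ := (PySem.List.mem_enumerate_iff _ _ _).mp hmem
  simp only [beq_iff_eq] at hdash
  have hk1 : k + 1 < objects_tmp.length := by
    rcases Nat.lt_or_ge (k + 1) objects_tmp.length with h | h
    · exact h
    · exfalso
      have hkl : k = objects_tmp.length - 1 := by omega
      subst hkl
      have : objects_tmp.getLast? = some objects_tmp[objects_tmp.length - 1] := by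
        rw [List.getLast?_eq_getElem?]
        exact List.getElem?_eq_getElem (by omega)
      exact hpre (this.trans (by rw [hdash]))
  refine ⟨objects_tmp[k + 1], ?_⟩
  have : ((0 : Int) + (k : Int)) + 1 = ((k + 1 : Nat) : Int) := by push_cast; ring
  rw [Prod.fst, this, PySem.List.pyGet?_natCast]
  exact List.getElem?_eq_getElem hk1

-- ===== VERDICT (by name: the statement is the Claim_ definition above) =====
theorem process_obj_string_spec : Claim_equal_process_obj_string := by
  intro xs _ hpre
  simp only [Spec_process_obj_string, process_obj_string, process_obj_string_alt]
  rw [pvFold_eq xs (PySem.List.enumerate xs) PySem.Dict.empty 0]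
  have hsome : ∀ d ∈ ((PySem.List.enumerate xs).filter (fun p => p.2 == "-")).map (·.1),
      (PySem.List.pyGet? xs (d + 1)).isSome := by
    intro d hd
    obtain ⟨t, ht⟩ := pvDash_get_some xs hpre d hd
    simp [ht]
  rw [pvFold_pairs xs _ PySem.Dict.empty 0 hsome]
  generalize hg : ((PySem.List.enumerate xs).filter (fun p => p.2 == "-")).map (·.1) = ds at hsome ⊢
  have hitems : ((pvPairs xs (((0 : Int) :: ds.dropLast.map (· + 2)).zip ds)).foldl pvG
        PySem.Dict.empty).items
      = (PySem.List.dedup ((pvPairs xs (((0 : Int) :: ds.dropLast.map (· + 2)).zip ds)).map (·.1))).map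
          (fun t => (t, (((pvPairs xs (((0 : Int) :: ds.dropLast.map (· + 2)).zip ds)).filter
                (fun p => p.1 == t)).map (·.2)).flatten)) := by
    have hnd := pvNodup_fold (pvPairs xs (((0 : Int) :: ds.dropLast.map (· + 2)).zip ds))
        PySem.Dict.empty (by simp)
    rw [PySem.Dict.items_eq_map_keys _ hnd ([] : List String), pvKeys_fold]
    rw [show (PySem.Dict.empty : PySem.Dict String (List String)).keys = [] from rfl,
      PySem.Set.update_nil_left, ← PySem.List.dedup_eq_ofList]
    apply List.map_congr_left
    intro t _
    rw [pvGetD_fold]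
    simp
  cases ds with
  | nil => simp [pvPairs, PySem.Dict.empty]
  | cons d rest =>
    obtain ⟨t, ht⟩ := Option.isSome_iff_exists.mp (hsome d List.mem_cons_self)
    have hzip : (((0 : Int) :: (d :: rest).dropLast.map (· + 2)).zip (d :: rest))
        = ((0 : Int), d) :: (((d + 2) :: rest.dropLast.map (· + 2)).zip rest) := by
      cases rest with
      | nil => simp
      | cons e es => simp [List.dropLast]
    have hpz : pvPairs xs ((((0 : Int) :: (d :: rest).dropLast.map (· + 2)).zip (d :: rest)))
        = (t, PySem.List.slice xs (some 0) (some d))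
            :: pvPairs xs ((((d + 2) :: rest.dropLast.map (· + 2)).zip rest)) := by
      rw [hzip]; simp [pvPairs, ht]
    simp only [List.isEmpty_cons, Bool.false_eq_true, if_false, hitems]
    rw [hpz]
    simp [PySem.List.dedup_eq_ofList, PySem.Set.ofList_cons]
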